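-- pv_equiv track=rewrite | github.com/codingkrabbe/adventofcode | jonathan/Aufgabe14/1.py | get_most_and_least_frequencies
-- ===== SOURCE A (Python) =====
-- def get_most_and_least_frequencies(input: str):
--     character_occurrences = dict()
--     for char in list(input):
--         if char in character_occurrences.keys():
--             character_occurrences[char] += 1
--         else:
--             character_occurrences[char] = 1
--     return max(character_occurrences.values()), min(character_occurrences.values())
-- ===== SOURCE B (Python) =====
-- def get_most_and_least_frequencies(input: str):
--     counts = []
--     prev = None
--     run = 0
--     for char in sorted(input):
--         if prev == char:
--             run += 1
--         else:
--             if run != 0: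
--                 counts.append(run)
--             prev = char
--             run = 1
--     if run != 0:
--         counts.append(run)
--     return max(counts), min(counts)
-- ===== Notes on version B (the rewrite author's own statement) =====
-- stated objective: alternative
-- what changed: B computes the frequencies by sorting the string and run-length-scanning the sorted characters instead of accumulating a hash-map of counts.
import Mathlib
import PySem

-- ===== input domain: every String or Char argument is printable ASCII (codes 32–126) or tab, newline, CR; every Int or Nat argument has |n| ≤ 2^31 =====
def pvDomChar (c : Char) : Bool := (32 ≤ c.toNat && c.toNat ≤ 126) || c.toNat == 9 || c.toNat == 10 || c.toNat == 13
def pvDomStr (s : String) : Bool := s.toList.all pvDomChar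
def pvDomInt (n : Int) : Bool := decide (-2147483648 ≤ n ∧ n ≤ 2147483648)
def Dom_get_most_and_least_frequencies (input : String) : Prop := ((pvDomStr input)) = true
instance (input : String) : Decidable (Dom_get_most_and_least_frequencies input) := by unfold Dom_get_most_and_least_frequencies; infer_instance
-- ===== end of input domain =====

-- B counts character frequencies by sorting and run-length scanning instead of a dict; same result, return value proved equal on nonempty input.

-- ===== PORT A =====
def get_most_and_least_frequencies (input : String) : Int × Int :=
  let character_occurrences : PySem.Dict Char Int :=
    input.toList.foldl
      (fun d char =>
        if d.contains char then d.insert char (d.getD char 0 + 1)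
        else d.insert char 1)
      PySem.Dict.empty
  ((PySem.List.max? character_occurrences.values (fun v => v)).getD 0,
   (PySem.List.min? character_occurrences.values (fun v => v)).getD 0)

-- ===== PORT B =====
-- one step of B's for-loop over the sorted characters; state = (counts, prev, run)
def pvBStep (st : List Int × Option Char × Int) (char : Char) : List Int × Option Char × Int :=
  if st.2.1 = some char then (st.1, st.2.1, st.2.2 + 1)
  else ((if st.2.2 ≠ 0 then st.1 ++ [st.2.2] else st.1), some char, 1)

def get_most_and_least_frequencies_alt (input : String) : Int × Int :=
  let st := (PySem.List.sorted input.toList (fun x => x) false).foldl pvBStep ([], none, 0)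
  let counts := if st.2.2 ≠ 0 then st.1 ++ [st.2.2] else st.1
  ((PySem.List.max? counts (fun v => v)).getD 0,
   (PySem.List.min? counts (fun v => v)).getD 0)

-- ===== PRECONDITION & SPEC =====
-- Pre_ excludes exactly the empty string, on which Python A (and B) raise ValueError from max([]).
def Pre_get_most_and_least_frequencies (input : String) : Prop := input ≠ ""
instance (input : String) : Decidable (Pre_get_most_and_least_frequencies input) := by unfold Pre_get_most_and_least_frequencies; infer_instance
def pvWitness_get_most_and_least_frequencies : String := "aab"

def Spec_get_most_and_least_frequencies (input : String) (out : Int × Int) : Prop := out = get_most_and_least_frequencies_alt input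
instance (input : String) (out : Int × Int) : Decidable (Spec_get_most_and_least_frequencies input out) := by unfold Spec_get_most_and_least_frequencies; infer_instance

-- ===== CLAIM (what is proved, stated in full; the proofs are below) =====
def Claim_equal_get_most_and_least_frequencies : Prop := ∀ (input : String), Dom_get_most_and_least_frequencies input → Pre_get_most_and_least_frequencies input → Spec_get_most_and_least_frequencies input (get_most_and_least_frequencies input)

-- ===== LEMMAS AND PROOFS =====

-- A's dict loop is Counter(xs)
theorem pvFoldA_eq_counter (xs : List Char) :
    xs.foldl (fun d char =>
        if d.contains char then d.insert char (d.getD char 0 + 1)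
        else d.insert char 1) PySem.Dict.empty = PySem.Dict.counter xs := by
  have hstep : (fun (d : PySem.Dict Char Int) char =>
      if d.contains char then d.insert char (d.getD char 0 + 1)
      else d.insert char 1)
      = fun d char => d.insert char (d.getD char 0 + 1) := by
    funext d c
    by_cases h : d.contains c
    · simp [h]
    · have h' : d.contains c = false := by simpa using h
      have h0 : d.getD c 0 = 0 := PySem.Dict.getD_of_not_contains d 0 h'
      simp [h', h0]
  rw [hstep, PySem.Dict.foldl_insert_getD_add_one_eq_counter]

-- membership in A's values list
theorem pvA_values_mem (xs : List Char) (v : Int) :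
    v ∈ (PySem.Dict.counter xs).values ↔ ∃ c ∈ xs, (xs.count c : Int) = v := by
  have : (PySem.Dict.counter xs).values
      = (PySem.Set.ofList xs).map (fun k => (xs.count k : Int)) := by
    show ((PySem.Dict.counter xs).items).map Prod.snd = _
    rw [PySem.Dict.items_counter, List.map_map]
    rfl
  rw [this]
  simp only [List.mem_map, PySem.Set.mem_ofList]

-- membership in the counts produced by B's loop, for a sorted suffix t
theorem pvB_loop_mem (t : List Char) :
    ∀ (p : Char) (run : Int) (counts : List Int),
    t.Pairwise (· ≤ ·) → (∀ x ∈ t, p ≤ x) → 0 < run →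
    ∀ v, (v ∈ (let st := t.foldl pvBStep (counts, some p, run);
               if st.2.2 ≠ 0 then st.1 ++ [st.2.2] else st.1))
      ↔ (v ∈ counts ∨ v = run + t.count p ∨ ∃ c ∈ t, c ≠ p ∧ v = (t.count c : Int)) := by
  induction t with
  | nil =>
    intro p run counts _ _ hr v
    have hr0 : run ≠ 0 := by omega
    simp [List.foldl, hr0]
  | cons c t ih =>
    intro p run counts hpw hp hr v
    have hpw' : t.Pairwise (· ≤ ·) := hpw.tail
    have hc : ∀ x ∈ t, c ≤ x := fun x hx => (List.pairwise_cons.mp hpw).1 x hx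
    by_cases hpc : p = c
    · subst hpc
      have hstep : pvBStep (counts, some p, run) p = (counts, some p, run + 1) := by
        simp [pvBStep]
      rw [List.foldl_cons, hstep]
      rw [ih p (run + 1) counts hpw' hc (by omega) v]
      constructor
      · rintro (h | h | ⟨c', hc', hne, hv⟩)
        · exact Or.inl h
        · refine Or.inr (Or.inl ?_)
          simp [List.count_cons]
          push_cast at h ⊢; omega
        · refine Or.inr (Or.inr ⟨c', List.mem_cons_of_mem _ hc', hne, ?_⟩)
          simp [List.count_cons, hne, Ne.symm hne, hv]
      · rintro (h | h | ⟨c', hc', hne, hv⟩)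
        · exact Or.inl h
        · refine Or.inr (Or.inl ?_)
          simp [List.count_cons] at h
          push_cast at h ⊢; omega
        · rcases List.mem_cons.mp hc' with rfl | hc't
          · exact absurd rfl hne
          · refine Or.inr (Or.inr ⟨c', hc't, hne, ?_⟩)
            simp [List.count_cons, hne, Ne.symm hne] at hv
            exact hv
    · -- p ≠ c, so p < c and p occurs nowhere in c :: t
      have hplt : p < c := lt_of_le_of_ne (hp c (List.mem_cons_self)) hpc
      have hpnot : p ∉ t := fun hmem => absurd (hc p hmem) (not_le.mpr hplt)
      have hstep : pvBStep (counts, some p, run) c = (counts ++ [run], some c, 1) := by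
        simp [pvBStep, hpc, (show ¬ run = 0 by omega)]
      rw [List.foldl_cons, hstep]
      rw [ih c 1 (counts ++ [run]) hpw' hc (by omega) v]
      have hcount_p : (c :: t).count p = 0 := by
        simp [List.count_cons, List.count_eq_zero.mpr hpnot, Ne.symm hpc]
      constructor
      · rintro (h | h | ⟨c', hc', hne, hv⟩)
        · rcases List.mem_append.mp h with h | h
          · exact Or.inl h
          · refine Or.inr (Or.inl ?_)
            simp at h
            rw [hcount_p]; omega
        · refine Or.inr (Or.inr ⟨c, List.mem_cons_self, Ne.symm hpc, ?_⟩)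
          simp [List.count_cons]
          push_cast at h ⊢; omega
        · have hne_p : c' ≠ p := fun h => hpnot (h ▸ hc')
          refine Or.inr (Or.inr ⟨c', List.mem_cons_of_mem _ hc', hne_p, ?_⟩)
          simp [List.count_cons, Ne.symm hne, hv]
      · rintro (h | h | ⟨c', hc', hne, hv⟩)
        · exact Or.inl (List.mem_append.mpr (Or.inl h))
        · rw [hcount_p] at h
          exact Or.inl (List.mem_append.mpr (Or.inr (by simp [h])))
        · rcases List.mem_cons.mp hc' with rfl | hc't
          · refine Or.inr (Or.inl ?_)
            simp [List.count_cons] at hv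
            push_cast at hv ⊢; omega
          · by_cases hcc : c' = c
            · subst hcc
              refine Or.inr (Or.inl ?_)
              simp [List.count_cons] at hv
              push_cast at hv ⊢; omega
            · refine Or.inr (Or.inr ⟨c', hc't, hcc, ?_⟩)
              simp [List.count_cons, Ne.symm hcc] at hv
              exact hv

-- max?/min? depend only on the set of elements
theorem pvMax_eq_of_mem_iff (l1 l2 : List Int) (h : ∀ v, v ∈ l1 ↔ v ∈ l2) (hne : l1 ≠ []) :
    PySem.List.max? l1 (fun v => v) = PySem.List.max? l2 (fun v => v) := by
  have hne2 : l2 ≠ [] := by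
    rcases List.exists_mem_of_ne_nil l1 hne with ⟨x, hx⟩
    exact List.ne_nil_of_mem ((h x).mp hx)
  obtain ⟨m1, hm1⟩ : ∃ m, PySem.List.max? l1 (fun v => v) = some m := by
    cases hm : PySem.List.max? l1 (fun v => v) with
    | none => rw [PySem.List.max?_eq_none_iff] at hm; exact absurd hm hne
    | some m => exact ⟨m, rfl⟩
  obtain ⟨m2, hm2⟩ : ∃ m, PySem.List.max? l2 (fun v => v) = some m := by
    cases hm : PySem.List.max? l2 (fun v => v) with
    | none => rw [PySem.List.max?_eq_none_iff] at hm; exact absurd hm hne2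
    | some m => exact ⟨m, rfl⟩
  have h1 := PySem.List.max?_mem hm1
  have h2 := PySem.List.max?_mem hm2
  have le12 : m1 ≤ m2 := PySem.List.max?_isMax hm2 m1 ((h m1).mp h1)
  have le21 : m2 ≤ m1 := PySem.List.max?_isMax hm1 m2 ((h m2).mpr h2)
  rw [hm1, hm2, le_antisymm le12 le21]

theorem pvMin_eq_of_mem_iff (l1 l2 : List Int) (h : ∀ v, v ∈ l1 ↔ v ∈ l2) (hne : l1 ≠ []) :
    PySem.List.min? l1 (fun v => v) = PySem.List.min? l2 (fun v => v) := by
  have hne2 : l2 ≠ [] := by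
    rcases List.exists_mem_of_ne_nil l1 hne with ⟨x, hx⟩
    exact List.ne_nil_of_mem ((h x).mp hx)
  obtain ⟨m1, hm1⟩ : ∃ m, PySem.List.min? l1 (fun v => v) = some m := by
    cases hm : PySem.List.min? l1 (fun v => v) with
    | none => rw [PySem.List.min?_eq_none_iff] at hm; exact absurd hm hne
    | some m => exact ⟨m, rfl⟩
  obtain ⟨m2, hm2⟩ : ∃ m, PySem.List.min? l2 (fun v => v) = some m := by
    cases hm : PySem.List.min? l2 (fun v => v) with
    | none => rw [PySem.List.min?_eq_none_iff] at hm; exact absurd hm hne2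
    | some m => exact ⟨m, rfl⟩
  have h1 := PySem.List.min?_mem hm1
  have h2 := PySem.List.min?_mem hm2
  have le21 : m2 ≤ m1 := PySem.List.min?_isMin hm2 m1 ((h m1).mp h1)
  have le12 : m1 ≤ m2 := PySem.List.min?_isMin hm1 m2 ((h m2).mpr h2)
  rw [hm1, hm2, le_antisymm le12 le21]

-- ===== VERDICT (by name: the statement is the Claim_ definition above) =====
theorem get_most_and_least_frequencies_spec : Claim_equal_get_most_and_least_frequencies := by
  intro input _ hpre
  unfold Spec_get_most_and_least_frequencies
  have hxs_ne : input.toList ≠ [] := by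
    intro h
    apply hpre
    have h2 := congrArg String.ofList h
    simpa using h2
  set xs := input.toList with hxs
  set s := PySem.List.sorted xs (fun x => x) false with hs
  have hs_perm : s.Perm xs := PySem.List.sorted_perm xs (fun x => x) false
  have hs_pw : s.Pairwise (· ≤ ·) := by
    simpa using PySem.List.sorted_pairwise xs (fun x => x)
  obtain ⟨c, t, hct⟩ : ∃ c t, s = c :: t := by
    cases hsl : s with
    | nil => rw [hs, PySem.List.sorted_eq_nil_iff] at hsl; exact absurd hsl hxs_ne
    | cons c t => exact ⟨c, t, rfl⟩
  have hcons := hs_pw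
  rw [hct] at hcons
  have hc_le : ∀ x ∈ t, c ≤ x := (List.pairwise_cons.mp hcons).1
  have ht_pw : t.Pairwise (· ≤ ·) := (List.pairwise_cons.mp hcons).2
  show ((PySem.List.max? (xs.foldl
          (fun d char =>
            if d.contains char then d.insert char (d.getD char 0 + 1)
            else d.insert char 1) PySem.Dict.empty).values (fun v => v)).getD 0,
        (PySem.List.min? (xs.foldl
          (fun d char =>
            if d.contains char then d.insert char (d.getD char 0 + 1)
            else d.insert char 1) PySem.Dict.empty).values (fun v => v)).getD 0)
      = ((PySem.List.max? (if (s.foldl pvBStep ([], none, 0)).2.2 ≠ 0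
              then (s.foldl pvBStep ([], none, 0)).1 ++ [(s.foldl pvBStep ([], none, 0)).2.2]
              else (s.foldl pvBStep ([], none, 0)).1) (fun v => v)).getD 0,
         (PySem.List.min? (if (s.foldl pvBStep ([], none, 0)).2.2 ≠ 0
              then (s.foldl pvBStep ([], none, 0)).1 ++ [(s.foldl pvBStep ([], none, 0)).2.2]
              else (s.foldl pvBStep ([], none, 0)).1) (fun v => v)).getD 0)
  rw [pvFoldA_eq_counter]
  have hfold : s.foldl pvBStep ([], none, 0) = t.foldl pvBStep ([], some c, 1) := by
    rw [hct, List.foldl_cons]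
    simp [pvBStep]
  have hB : ∀ v, (v ∈ (if (s.foldl pvBStep ([], none, 0)).2.2 ≠ 0
              then (s.foldl pvBStep ([], none, 0)).1 ++ [(s.foldl pvBStep ([], none, 0)).2.2]
              else (s.foldl pvBStep ([], none, 0)).1))
      ↔ (v = 1 + (t.count c : Int) ∨ ∃ ch ∈ t, ch ≠ c ∧ v = (t.count ch : Int)) := by
    intro v
    rw [hfold]
    have h := pvB_loop_mem t c 1 [] ht_pw hc_le (by omega) v
    simpa using h
  have hcount : ∀ ch, s.count ch = xs.count ch := fun ch => hs_perm.count_eq ch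
  have hmem : ∀ v, v ∈ (PySem.Dict.counter xs).values ↔
      v ∈ (if (s.foldl pvBStep ([], none, 0)).2.2 ≠ 0
              then (s.foldl pvBStep ([], none, 0)).1 ++ [(s.foldl pvBStep ([], none, 0)).2.2]
              else (s.foldl pvBStep ([], none, 0)).1) := by
    intro v
    rw [pvA_values_mem, hB v]
    constructor
    · rintro ⟨ch, hch, hv⟩
      have hch_s : ch ∈ s := hs_perm.symm.subset hch
      rw [hct] at hch_s
      by_cases hcc : ch = c
      · subst hcc
        refine Or.inl ?_
        have hsc : s.count ch = 1 + t.count ch := by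
          rw [hct]; simp [List.count_cons]; omega
        rw [hcount ch] at hsc
        push_cast
        omega
      · have hch_t : ch ∈ t := by
          rcases List.mem_cons.mp hch_s with h | h
          · exact absurd h hcc
          · exact h
        refine Or.inr ⟨ch, hch_t, hcc, ?_⟩
        have hsc : s.count ch = t.count ch := by
          rw [hct]; simp [List.count_cons, Ne.symm hcc]
        rw [hcount ch] at hsc
        rw [← hv, hsc]
    · rintro (h | ⟨ch, hch, hne, hv⟩)
      · refine ⟨c, hs_perm.subset (hct ▸ List.mem_cons_self), ?_⟩
        have hsc : s.count c = 1 + t.count c := by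
          rw [hct]; simp [List.count_cons]; omega
        rw [hcount c] at hsc
        push_cast at h ⊢
        omega
      · refine ⟨ch, hs_perm.subset (hct ▸ List.mem_cons_of_mem _ hch), ?_⟩
        have hsc : s.count ch = t.count ch := by
          rw [hct]; simp [List.count_cons, Ne.symm hne]
        rw [hcount ch] at hsc
        omega
  have hAne : (PySem.Dict.counter xs).values ≠ [] := by
    rcases List.exists_mem_of_ne_nil xs hxs_ne with ⟨x, hx⟩
    exact List.ne_nil_of_mem ((pvA_values_mem xs (xs.count x)).mpr ⟨x, hx, rfl⟩)
  rw [pvMax_eq_of_mem_iff _ _ hmem hAne, pvMin_eq_of_mem_iff _ _ hmem hAne]
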